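-- pv_equiv track=rewrite | github.com/wurlinney/AISD | sem1/lab4/task6/task6.py | queue_with_min
-- ===== SOURCE A (Python) =====
-- from collections import deque
--
-- def queue_with_min(commands):
--     queue = deque()
--     min_queue = deque()
--     result = []
--     for command in commands:
--         if command.startswith('+'):
--             x = command.split()[1]
--             queue.append(x)
--             while min_queue and min_queue[-1] > x:
--                 min_queue.pop()
--             min_queue.append(command.split()[1])
--         elif command.startswith('-'):
--             if queue:
--                 removed = queue.popleft()
--                 if removed == min_queue[0]:
--                     min_queue.popleft()
--
--         elif command.startswith('?'):
--             if min_queue: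
--                 result.append(min_queue[0])
--             else:
--                 result.append(None)
--     return result
-- ===== SOURCE B (Python) =====
-- def queue_with_min(commands):
--     queue = []
--     result = []
--     for command in commands:
--         if command.startswith('+'):
--             queue.append(command.split()[1])
--         elif command.startswith('-'):
--             if queue:
--                 queue.pop(0)
--         elif command.startswith('?'):
--             result.append(min(queue) if queue else None)
--     return result
-- ===== Notes on version B (the rewrite author's own statement) =====
-- stated objective: simpler
-- what changed: B drops the auxiliary monotonic min-deque entirely: it keeps only the plain queue and computes min(queue) by a direct scan on each '?' query.
import Mathlib
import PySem

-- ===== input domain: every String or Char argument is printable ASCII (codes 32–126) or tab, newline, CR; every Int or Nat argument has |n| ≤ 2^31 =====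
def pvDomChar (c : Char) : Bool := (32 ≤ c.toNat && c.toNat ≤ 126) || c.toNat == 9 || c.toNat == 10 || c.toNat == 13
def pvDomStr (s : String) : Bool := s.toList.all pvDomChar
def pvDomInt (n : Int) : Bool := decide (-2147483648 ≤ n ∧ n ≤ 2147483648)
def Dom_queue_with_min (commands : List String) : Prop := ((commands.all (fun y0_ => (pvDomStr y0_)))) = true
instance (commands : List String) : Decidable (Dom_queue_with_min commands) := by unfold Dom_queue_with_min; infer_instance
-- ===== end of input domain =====

-- B drops A's auxiliary monotonic min-deque: it keeps only the plain queue and scans it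
-- for the minimum on each '?' query (objective: simpler; not faster).

-- ===== PORT A =====
-- the while loop 'while min_queue and min_queue[-1] > x: min_queue.pop()'
def qwmPopBack (x : String) (mq : List String) : List String :=
  match h : mq.getLast? with
  | some l => if l > x then qwmPopBack x mq.dropLast else mq
  | none => mq
termination_by mq.length
decreasing_by
  cases mq with
  | nil => simp at h
  | cons a t => simp [List.length_dropLast]

-- one iteration of A's for-loop; state = (queue, min_queue, result), deques with the front at the head
def qwmStepA (st : List String × List String × List (Option String)) (command : String) :
    List String × List String × List (Option String) :=
  if PySem.Str.startswith command "+" = true then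
    match (PySem.Str.split₀ command)[1]? with
    | some x => (st.1 ++ [x], qwmPopBack x st.2.1 ++ [x], st.2.2)
    | none => st  -- Python raises IndexError here; excluded by Pre_
  else if PySem.Str.startswith command "-" = true then
    match st.1 with
    | [] => st
    | removed :: rest =>
      match st.2.1 with
      | m0 :: mrest => if removed == m0 then (rest, mrest, st.2.2) else (rest, m0 :: mrest, st.2.2)
      | [] => (rest, [], st.2.2)  -- min_queue[0] on empty min_queue: unreachable (min_queue is empty iff queue is)
  else if PySem.Str.startswith command "?" = true then
    match st.2.1 with
    | m0 :: _ => (st.1, st.2.1, st.2.2 ++ [some m0])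
    | [] => (st.1, st.2.1, st.2.2 ++ [none])
  else st

def queue_with_min (commands : List String) : List (Option String) :=
  (commands.foldl qwmStepA ([], [], [])).2.2

-- ===== PORT B =====
-- one iteration of B's for-loop; state = (queue, result)
def qwmStepB (st : List String × List (Option String)) (command : String) :
    List String × List (Option String) :=
  if PySem.Str.startswith command "+" = true then
    match (PySem.Str.split₀ command)[1]? with
    | some x => (st.1 ++ [x], st.2)
    | none => st  -- Python raises IndexError here; excluded by Pre_
  else if PySem.Str.startswith command "-" = true then
    match st.1 with
    | [] => st
    | _ :: rest => (rest, st.2)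
  else if PySem.Str.startswith command "?" = true then
    (st.1, st.2 ++ [if st.1.isEmpty then none else PySem.List.min? st.1 (fun y => y)])
  else st

def queue_with_min_alt (commands : List String) : List (Option String) :=
  (commands.foldl qwmStepB ([], [])).2

-- ===== PRECONDITION & SPEC =====
-- Pre_ excludes exactly the inputs on which the Python A raises: a '+' command whose split()
-- has no second token (e.g. '+' or '+ ') makes command.split()[1] raise IndexError (in B too).
def Pre_queue_with_min (commands : List String) : Prop :=
  ∀ c ∈ commands, PySem.Str.startswith c "+" = true → 2 ≤ (PySem.Str.split₀ c).length
instance (commands : List String) : Decidable (Pre_queue_with_min commands) := by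
  unfold Pre_queue_with_min; infer_instance

def pvWitness_queue_with_min : List String := ["+ 2", "+ 1", "?", "-", "?", "-", "-", "?"]

def Spec_queue_with_min (commands : List String) (out : List (Option String)) : Prop := out = queue_with_min_alt commands
instance (commands : List String) (out : List (Option String)) : Decidable (Spec_queue_with_min commands out) := by unfold Spec_queue_with_min; infer_instance

-- ===== CLAIM (what is proved, stated in full; the proofs are below) =====
def Claim_equal_queue_with_min : Prop := ∀ (commands : List String), Dom_queue_with_min commands → Pre_queue_with_min commands → Spec_queue_with_min commands (queue_with_min commands)

-- ===== LEMMAS AND PROOFS =====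

-- the suffix-minima of the queue: exactly A's min_queue contents
def sufmins : List String → List String
  | [] => []
  | x :: xs => if xs.all (fun y => decide (x ≤ y)) then x :: sufmins xs else sufmins xs

theorem sufmins_ne_nil (q : List String) (h : q ≠ []) : sufmins q ≠ [] := by
  induction q with
  | nil => exact absurd rfl h
  | cons a t ih =>
    unfold sufmins
    split
    · simp
    · rename_i hall
      apply ih
      intro e; subst e; simp at hall

theorem mem_sufmins {x : String} {q : List String} (h : x ∈ sufmins q) : x ∈ q := by
  induction q with
  | nil => simp [sufmins] at h
  | cons a t ih =>
    unfold sufmins at h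
    split at h
    · rcases List.mem_cons.1 h with h | h
      · simp [h]
      · exact List.mem_cons_of_mem _ (ih h)
    · exact List.mem_cons_of_mem _ (ih h)

theorem sufmins_head_min {q : List String} {m : String} {t : List String}
    (h : sufmins q = m :: t) : m ∈ q ∧ ∀ y ∈ q, m ≤ y := by
  induction q generalizing t with
  | nil => simp [sufmins] at h
  | cons a s ih =>
    unfold sufmins at h
    split at h
    · rename_i hall
      obtain ⟨rfl, _⟩ := List.cons.inj h
      refine ⟨List.mem_cons_self, ?_⟩
      intro y hy
      rcases List.mem_cons.1 hy with rfl | hy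
      · exact le_refl _
      · simpa using (List.all_eq_true.1 hall y hy)
    · rename_i hall
      obtain ⟨hm, hmin⟩ := ih h
      have hne : ∃ y ∈ s, ¬ a ≤ y := by
        by_contra hc
        simp only [not_exists, not_and, not_not] at hc
        exact hall (List.all_eq_true.2 (fun y hy => by simpa using hc y hy))
      obtain ⟨y, hy, hya⟩ := hne
      refine ⟨List.mem_cons_of_mem _ hm, ?_⟩
      intro z hz
      rcases List.mem_cons.1 hz with rfl | hz
      · exact le_of_lt (lt_of_le_of_lt (hmin y hy) (lt_of_not_ge hya))
      · exact hmin z hz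

theorem sufmins_pairwise (q : List String) : (sufmins q).Pairwise (· ≤ ·) := by
  induction q with
  | nil => simp [sufmins]
  | cons a t ih =>
    unfold sufmins
    split
    · rename_i hall
      refine List.Pairwise.cons ?_ ih
      intro b hb
      simpa using List.all_eq_true.1 hall b (mem_sufmins hb)
    · exact ih

theorem popBack_eq_filter (x : String) (mq : List String) (h : mq.Pairwise (· ≤ ·)) :
    qwmPopBack x mq = mq.filter (fun y => decide (y ≤ x)) := by
  induction mq using List.reverseRecOn with
  | nil => simp [qwmPopBack]
  | append_singleton t l ih =>
    have hpw : t.Pairwise (· ≤ ·) := (List.pairwise_append.1 h).1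
    have hle : ∀ a ∈ t, a ≤ l := fun a ha => (List.pairwise_append.1 h).2.2 a ha l (by simp)
    rw [qwmPopBack]
    split
    · rename_i l' h'
      rw [List.getLast?_concat] at h'
      obtain rfl : l = l' := Option.some.inj h'
      rw [List.dropLast_concat, List.filter_append]
      by_cases hlx : l > x
      · rw [if_pos hlx, ih hpw]
        have hd : (decide (l ≤ x)) = false := decide_eq_false (not_le_of_gt hlx)
        simp only [List.filter_cons, List.filter_nil, hd, Bool.false_eq_true, if_false,
          List.append_nil]
      · rw [if_neg hlx]
        have hlx' : l ≤ x := le_of_not_gt hlx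
        have : ∀ a ∈ t, (fun y => decide (y ≤ x)) a = true := fun a ha => by
          simp [le_trans (hle a ha) hlx']
        rw [List.filter_eq_self.2 this]
        have hd : (decide (l ≤ x)) = true := decide_eq_true hlx'
        simp only [List.filter_cons, List.filter_nil, hd, if_true]
    · rename_i h'
      rw [List.getLast?_concat] at h'
      cases h'

theorem sufmins_append (q : List String) (x : String) :
    sufmins (q ++ [x]) = (sufmins q).filter (fun y => decide (y ≤ x)) ++ [x] := by
  induction q with
  | nil => simp [sufmins]
  | cons a t ih =>
    show sufmins (a :: (t ++ [x])) = _
    unfold sufmins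
    rw [List.all_append]
    by_cases h1 : t.all (fun y => decide (a ≤ y)) = true
    · by_cases h2 : a ≤ x
      · have hd : (decide (a ≤ x)) = true := decide_eq_true h2
        simp only [h1, List.all_cons, List.all_nil, hd, Bool.and_true, if_true,
          List.filter_cons, ih]
        simp
      · have hd : (decide (a ≤ x)) = false := decide_eq_false h2
        simp only [h1, List.all_cons, List.all_nil, hd, Bool.and_true, Bool.true_and,
          Bool.false_eq_true, if_false, if_true, List.filter_cons, ih]
    · have h1' : (t.all (fun y => decide (a ≤ y))) = false := by
        cases hh : t.all (fun y => decide (a ≤ y)) with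
        | false => rfl
        | true => exact absurd hh h1
      simp only [h1', Bool.false_and, Bool.false_eq_true, if_false, ih]

theorem min?_eq_head_sufmins (q : List String) :
    (if q.isEmpty then none else PySem.List.min? q (fun y => y)) = (sufmins q).head? := by
  cases q with
  | nil => simp [sufmins]
  | cons a t =>
    simp only [List.isEmpty_cons, Bool.false_eq_true, if_false]
    cases hm : PySem.List.min? (a :: t) (fun y => y) with
    | none => exact absurd ((PySem.List.min?_eq_none_iff _ _).1 hm) (by simp)
    | some m' =>
      cases hs : sufmins (a :: t) with
      | nil => exact absurd hs (sufmins_ne_nil _ (by simp))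
      | cons m tt =>
        obtain ⟨hmem, hmin⟩ := sufmins_head_min hs
        have h1 := PySem.List.min?_isMin hm
        have h2 := PySem.List.min?_mem hm
        simp only [List.head?_cons]
        exact congrArg some (le_antisymm (h1 m hmem) (hmin m' h2))

theorem loop_eq (cs : List String) : ∀ (q : List String) (res : List (Option String)),
    (cs.foldl qwmStepA (q, sufmins q, res)).2.2 = (cs.foldl qwmStepB (q, res)).2 := by
  induction cs with
  | nil => intro q res; rfl
  | cons c cs ih =>
    intro q res
    simp only [List.foldl_cons]
    by_cases hplus : PySem.Str.startswith c "+" = true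
    · cases hx : (PySem.Str.split₀ c)[1]? with
      | some x =>
        have hA : qwmStepA (q, sufmins q, res) c = (q ++ [x], sufmins (q ++ [x]), res) := by
          simp only [qwmStepA, hplus, if_true, hx]
          rw [popBack_eq_filter x _ (sufmins_pairwise q), ← sufmins_append]
        have hB : qwmStepB (q, res) c = (q ++ [x], res) := by
          simp only [qwmStepB, hplus, if_true, hx]
        rw [hA, hB]; exact ih _ _
      | none =>
        have hA : qwmStepA (q, sufmins q, res) c = (q, sufmins q, res) := by
          simp only [qwmStepA, hplus, if_true, hx]
        have hB : qwmStepB (q, res) c = (q, res) := by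
          simp only [qwmStepB, hplus, if_true, hx]
        rw [hA, hB]; exact ih _ _
    · by_cases hminus : PySem.Str.startswith c "-" = true
      · cases q with
        | nil =>
          have hA : qwmStepA ([], sufmins [], res) c = ([], sufmins [], res) := by
            simp only [qwmStepA, hplus, hminus, if_true, Bool.false_eq_true, if_false, sufmins]
          have hB : qwmStepB ([], res) c = ([], res) := by
            simp only [qwmStepB, hplus, hminus, if_true, Bool.false_eq_true, if_false]
          rw [hA, hB]; exact ih _ _
        | cons r rest =>
          by_cases hall : rest.all (fun y => decide (r ≤ y)) = true
          · have hs : sufmins (r :: rest) = r :: sufmins rest := by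
              rw [sufmins, if_pos hall]
            have hA : qwmStepA (r :: rest, sufmins (r :: rest), res) c
                = (rest, sufmins rest, res) := by
              simp only [qwmStepA, hplus, hminus, if_true, Bool.false_eq_true, if_false, hs,
                beq_self_eq_true]
            have hB : qwmStepB (r :: rest, res) c = (rest, res) := by
              simp only [qwmStepB, hplus, hminus, if_true, Bool.false_eq_true, if_false]
            rw [hA, hB]; exact ih _ _
          · have hs : sufmins (r :: rest) = sufmins rest := by
              rw [sufmins, if_neg hall]
            have hrest : rest ≠ [] := by
              intro e; subst e; simp at hall
            cases hsr : sufmins rest with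
            | nil => exact absurd hsr (sufmins_ne_nil _ hrest)
            | cons m0 mrest =>
              obtain ⟨hm0, hmin0⟩ := sufmins_head_min hsr
              have hlt : ∃ y ∈ rest, ¬ r ≤ y := by
                by_contra hc
                simp only [not_exists, not_and, not_not] at hc
                exact hall (List.all_eq_true.2 (fun y hy => by simpa using hc y hy))
              obtain ⟨y, hy, hyr⟩ := hlt
              have hne : m0 ≠ r :=
                ne_of_lt (lt_of_le_of_lt (hmin0 y hy) (lt_of_not_ge hyr))
              have hbeq : (r == m0) = false := beq_eq_false_iff_ne.2 (Ne.symm hne)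
              have hA : qwmStepA (r :: rest, sufmins (r :: rest), res) c
                  = (rest, m0 :: mrest, res) := by
                simp only [qwmStepA, hplus, hminus, if_true, Bool.false_eq_true, if_false, hs,
                  hsr, hbeq]
              have hB : qwmStepB (r :: rest, res) c = (rest, res) := by
                simp only [qwmStepB, hplus, hminus, if_true, Bool.false_eq_true, if_false]
              rw [hA, hB, ← hsr]; exact ih _ _
      · by_cases hq : PySem.Str.startswith c "?" = true
        · cases hs : sufmins q with
          | nil =>
            have hqnil : q = [] := by
              by_contra hc
              exact sufmins_ne_nil q hc hs
            subst hqnil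
            have hA : qwmStepA ([], [], res) c = ([], [], res ++ [none]) := by
              simp only [qwmStepA, hplus, hminus, hq, if_true, Bool.false_eq_true, if_false]
            have hB : qwmStepB ([], res) c = ([], res ++ [none]) := by
              simp only [qwmStepB, hplus, hminus, hq, if_true, Bool.false_eq_true, if_false,
                List.isEmpty_nil]
            rw [hA, hB]; exact ih _ _
          | cons m0 tt =>
            have hA : qwmStepA (q, m0 :: tt, res) c = (q, m0 :: tt, res ++ [some m0]) := by
              simp only [qwmStepA, hplus, hminus, hq, if_true, Bool.false_eq_true, if_false]
            have hB : qwmStepB (q, res) c = (q, res ++ [some m0]) := by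
              have hmn := min?_eq_head_sufmins q
              rw [hs] at hmn
              simp only [List.head?_cons] at hmn
              simp only [qwmStepB, hplus, hminus, hq, if_true, Bool.false_eq_true, if_false, hmn]
            rw [hA, hB, ← hs]; exact ih _ _
        · have hA : qwmStepA (q, sufmins q, res) c = (q, sufmins q, res) := by
            simp only [qwmStepA, hplus, hminus, hq, Bool.false_eq_true, if_false]
          have hB : qwmStepB (q, res) c = (q, res) := by
            simp only [qwmStepB, hplus, hminus, hq, Bool.false_eq_true, if_false]
          rw [hA, hB]; exact ih _ _

-- ===== VERDICT (by name: the statement is the Claim_ definition above) =====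
theorem queue_with_min_spec : Claim_equal_queue_with_min := by
  intro commands _ _
  unfold Spec_queue_with_min queue_with_min queue_with_min_alt
  have h := loop_eq commands [] []
  simpa [sufmins] using h
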